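-- pv_equiv track=rewrite | github.com/jerrylee17/Algorithms | GoogleCompetitions/CodeJam/2021/Round1A/problem2.py | solve
-- ===== SOURCE A (Python) =====
-- import functools
--
-- def solve(cards):
--     hand = []
--     for p, n in cards:
--         hand.extend([p]*n)
--     x = 0
--     maxScore = 0
--     while x < 2**len(hand):
--         h1 = []
--         h2 = []
--         for i, e in enumerate(hand):
--             if x & (2**(i)) == 0:
--                 h1.append(e)
--             else:
--                 h2.append(e)
--         if sum(h1) == functools.reduce(lambda x, y : x*y, h2, 1):
--             maxScore = max(maxScore, sum(h1))
--         x += 1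
--     return maxScore
-- ===== SOURCE B (Python) =====
-- def solve(cards):
--     total = sum(p * n for p, n in cards if n > 0)
--
--     def go(i, s, pr):
--         # s = sum moved to the product side so far, pr = its product
--         if i == len(cards):
--             return total - s if total - s == pr else 0
--         p, n = cards[i]
--         b = 0
--         for k in range(max(n, 0) + 1):
--             b = max(b, go(i + 1, s + k * p, pr * p ** k))
--         return b
--
--     return go(0, 0, 1)
-- ===== Notes on version B (the rewrite author's own statement) =====
-- stated objective: alternative
-- what changed: A enumerates all 2^N bitmask splits of the flattened hand of individual cards; B recurses over the card entries choosing only how many copies of each value move to the product side, collapsing identical copies so the search is Prod(n_i+1) instead of 2^(Sum n_i).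
import Mathlib
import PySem

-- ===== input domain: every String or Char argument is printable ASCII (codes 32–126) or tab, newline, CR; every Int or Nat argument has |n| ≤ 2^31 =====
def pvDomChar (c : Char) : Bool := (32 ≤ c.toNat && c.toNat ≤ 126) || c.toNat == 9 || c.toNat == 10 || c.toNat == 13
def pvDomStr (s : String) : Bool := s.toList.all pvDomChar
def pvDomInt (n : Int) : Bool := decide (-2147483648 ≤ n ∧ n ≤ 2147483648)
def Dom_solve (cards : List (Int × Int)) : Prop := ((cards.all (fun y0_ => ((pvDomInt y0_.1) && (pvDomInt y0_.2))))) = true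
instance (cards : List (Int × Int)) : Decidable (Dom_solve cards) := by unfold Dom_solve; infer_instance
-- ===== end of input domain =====

-- B replaces A's 2^N bitmask enumeration of individual cards by a per-entry recursion
-- choosing how many copies of each value move to the product side (collapses identical copies; objective: alternative).

-- ===== PORT A =====
-- hand built by extending with [p]*n ([p]*n is empty for n ≤ 0, hence n.toNat)
def handOf (cards : List (Int × Int)) : List Int :=
  cards.foldl (fun h q => h ++ List.replicate q.2.toNat q.1) []

-- the inner 'for i, e in enumerate(hand)' loop: appends e to h1 or h2 by the bit test
def splitFold (x : Nat) : Nat → List Int → List Int × List Int → List Int × List Int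
  | _, [], st => st
  | i, e :: t, (h1, h2) =>
    if x &&& 2 ^ i = 0 then splitFold x (i + 1) t (h1 ++ [e], h2)
    else splitFold x (i + 1) t (h1, h2 ++ [e])

def solve (cards : List (Int × Int)) : Int :=
  let hand := handOf cards
  -- while x < 2**len(hand): x = 0,1,2,…  → fold over range(2^len)
  (List.range (2 ^ hand.length)).foldl
    (fun maxScore x =>
      let st := splitFold x 0 hand ([], [])
      if st.1.foldl (· + ·) 0 = st.2.foldl (· * ·) 1 then
        max maxScore (st.1.foldl (· + ·) 0)
      else maxScore) 0

-- ===== PORT B =====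
-- total = sum(p * n for p, n in cards if n > 0)
def totalOf (cards : List (Int × Int)) : Int :=
  cards.foldl (fun t q => if q.2 > 0 then t + q.1 * q.2 else t) 0

-- go(i, s, pr): recursion over the remaining cards (suffix ↔ index i);
-- for k in range(max(n,0)+1): b = max(b, go(i+1, s + k*p, pr * p**k))
def goB (total : Int) : List (Int × Int) → Int → Int → Int
  | [], s, pr => if total - s = pr then total - s else 0
  | (p, n) :: cs, s, pr =>
    (List.range (n.toNat + 1)).foldl
      (fun b (k : Nat) => max b (goB total cs (s + (k : Int) * p) (pr * p ^ k))) 0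

def solve_alt (cards : List (Int × Int)) : Int :=
  goB (totalOf cards) cards 0 1

-- ===== PRECONDITION & SPEC =====
def Spec_solve (cards : List (Int × Int)) (out : Int) : Prop := out = solve_alt cards
instance (cards : List (Int × Int)) (out : Int) : Decidable (Spec_solve cards out) := by unfold Spec_solve; infer_instance

-- ===== CLAIM (what is proved, stated in full; the proofs are below) =====
def Claim_equal_solve : Prop := ∀ (cards : List (Int × Int)), Dom_solve cards → Spec_solve cards (solve cards)


-- ===== LEMMAS AND PROOFS =====

-- block of copies contributed by one card entry
def blk (q : Int × Int) : List Int := List.replicate q.2.toNat q.1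

def isum (l : List Int) : Int := l.foldl (· + ·) 0
def iprod (l : List Int) : Int := l.foldl (· * ·) 1

-- all (moved-sum, moved-product) pairs over the 2^n splits of a hand
def mp : List Int → List (Int × Int)
  | [] => [(0, 1)]
  | e :: t => mp t ++ (mp t).map (fun q => (q.1 + e, q.2 * e))

-- bit-recursion form of the inner split
def splitAux (x : Nat) : List Int → List Int × List Int
  | [] => ([], [])
  | e :: t =>
    let r := splitAux (x / 2) t
    if x % 2 = 0 then (e :: r.1, r.2) else (r.1, e :: r.2)

def pairOf (x : Nat) (h : List Int) : Int × Int :=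
  (isum (splitAux x h).2, iprod (splitAux x h).2)

def leaf (T : Int) (q : Int × Int) : Int := if T - q.1 = q.2 then T - q.1 else 0

def mfold (l : List Int) : Int := l.foldl max 0

lemma foldl_add_init (l : List Int) : ∀ a : Int, l.foldl (· + ·) a = a + l.foldl (· + ·) 0 := by
  induction l with
  | nil => intro a; simp
  | cons e t ih => intro a; simp only [List.foldl_cons]; rw [ih (a + e), ih (0 + e)]; ring

lemma foldl_mul_init (l : List Int) : ∀ a : Int, l.foldl (· * ·) a = a * l.foldl (· * ·) 1 := by
  induction l with
  | nil => intro a; simp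
  | cons e t ih => intro a; simp only [List.foldl_cons]; rw [ih (a * e), ih (1 * e)]; ring

lemma isum_cons (e : Int) (l : List Int) : isum (e :: l) = e + isum l := by
  simp only [isum, List.foldl_cons]; rw [foldl_add_init l (0 + e)]; ring

lemma iprod_cons (e : Int) (l : List Int) : iprod (e :: l) = e * iprod l := by
  simp only [iprod, List.foldl_cons]; rw [foldl_mul_init l (1 * e)]; ring

lemma isum_append (l1 l2 : List Int) : isum (l1 ++ l2) = isum l1 + isum l2 := by
  simp only [isum, List.foldl_append]; rw [foldl_add_init l2 (l1.foldl (· + ·) 0)]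

lemma isum_replicate (m : Nat) (p : Int) : isum (List.replicate m p) = m * p := by
  induction m with
  | zero => simp [isum]
  | succ k ih => rw [List.replicate_succ, isum_cons, ih]; push_cast; ring

-- the port's inner append loop equals the bit recursion
lemma splitFold_eq (hand : List Int) : ∀ (x i : Nat) (h1 h2 : List Int),
    splitFold x i hand (h1, h2) =
      (h1 ++ (splitAux (x >>> i) hand).1, h2 ++ (splitAux (x >>> i) hand).2) := by
  induction hand with
  | nil => intro x i h1 h2; simp [splitFold, splitAux]
  | cons e t ih =>
    intro x i h1 h2
    have hbit : (x &&& 2 ^ i = 0) ↔ ((x >>> i) % 2 = 0) := by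
      have hpow : 0 < 2 ^ i := Nat.two_pow_pos i
      have htb : x.testBit i = decide (x / 2 ^ i % 2 = 1) := Nat.testBit_eq_decide_div_mod_eq
      rw [Nat.and_two_pow, htb, Nat.shiftRight_eq_div_pow]
      by_cases hd : x / 2 ^ i % 2 = 1
      · have hdec : decide (x / 2 ^ i % 2 = 1) = true := by simpa using hd
        rw [hdec]
        simp only [Bool.toNat_true, one_mul]
        constructor
        · intro h0; exfalso; omega
        · intro h0; exfalso; omega
      · have hdec : decide (x / 2 ^ i % 2 = 1) = false := by simpa using hd
        rw [hdec]
        simp only [Bool.toNat_false, Nat.zero_mul]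
        constructor
        · intro _; omega
        · intro _; trivial
    have hdiv : x >>> (i + 1) = (x >>> i) / 2 := Nat.shiftRight_succ x i
    by_cases hc : x &&& 2 ^ i = 0
    · have h2' : (x >>> i) % 2 = 0 := hbit.mp hc
      simp only [splitFold, hc, ih x (i + 1)]
      simp only [splitAux, hdiv, h2']
      simp
    · have h2' : ¬ ((x >>> i) % 2 = 0) := fun h => hc (hbit.mpr h)
      simp only [splitFold, if_neg hc, ih x (i + 1)]
      simp only [splitAux, hdiv, if_neg h2']
      simp
  
lemma splitAux_sum (x : Nat) (h : List Int) :
    isum (splitAux x h).1 + isum (splitAux x h).2 = isum h := by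
  induction h generalizing x with
  | nil => simp [splitAux, isum]
  | cons e t ih =>
    simp only [splitAux]
    by_cases hp : x % 2 = 0
    · simp only [if_pos hp, isum_cons]
      have := ih (x / 2); omega
    · simp only [if_neg hp, isum_cons]
      have := ih (x / 2); omega

-- max-fold toolkit
lemma le_foldl_max {β : Type} (f : β → Int) (l : List β) : ∀ a : Int,
    a ≤ l.foldl (fun b k => max b (f k)) a := by
  induction l with
  | nil => intro a; simp
  | cons e t ih =>
    intro a
    exact le_trans (le_max_left a (f e)) (ih (max a (f e)))

lemma le_mfold_init (l : List Int) : ∀ a : Int, a ≤ l.foldl max a := by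
  induction l with
  | nil => intro a; simp
  | cons e t ih => intro a; exact le_trans (le_max_left a e) (ih (max a e))

lemma mem_le_mfold (l : List Int) : ∀ (a v : Int), v ∈ l → v ≤ l.foldl max a := by
  induction l with
  | nil => intro a v hv; simp at hv
  | cons e t ih =>
    intro a v hv
    rcases List.mem_cons.mp hv with h | h
    · subst h; exact le_trans (le_max_right a v) (le_mfold_init t _)
    · exact ih _ v h

lemma mfold_le (l : List Int) : ∀ (a b : Int), a ≤ b → (∀ v ∈ l, v ≤ b) → l.foldl max a ≤ b := by
  induction l with
  | nil => intro a b hab _; simpa using hab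
  | cons e t ih =>
    intro a b hab hv
    exact ih _ b (max_le hab (hv e (List.mem_cons_self))) fun v h => hv v (List.mem_cons_of_mem _ h)

lemma mfold_mem_congr (l1 l2 : List Int) (h : ∀ v, v ∈ l1 ↔ v ∈ l2) : mfold l1 = mfold l2 := by
  apply le_antisymm
  · exact mfold_le l1 0 _ (le_mfold_init l2 0) fun v hv => mem_le_mfold l2 0 v ((h v).mp hv)
  · exact mfold_le l2 0 _ (le_mfold_init l1 0) fun v hv => mem_le_mfold l1 0 v ((h v).mpr hv)

lemma foldl_max_comm (l : List Int) : ∀ a b : Int, l.foldl max (max a b) = max a (l.foldl max b) := by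
  induction l with
  | nil => intro a b; simp
  | cons e t ih =>
    intro a b
    simp only [List.foldl_cons]
    rw [max_assoc, ih]

lemma foldl_max_split (l : List Int) (a : Int) (ha : 0 ≤ a) : l.foldl max a = max a (mfold l) := by
  have : max a (0 : Int) = a := max_eq_left ha
  calc l.foldl max a = l.foldl max (max a 0) := by rw [this]
    _ = max a (l.foldl max 0) := foldl_max_comm l a 0

-- A's accumulator loop as a max-fold over mapped scores
lemma foldl_step_eq {β : Type} (c : β → Prop) [DecidablePred c] (v : β → Int) (l : List β) :
    ∀ a : Int, 0 ≤ a →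
    l.foldl (fun acc b => if c b then max acc (v b) else acc) a =
      (l.map (fun b => if c b then v b else 0)).foldl max a := by
  induction l with
  | nil => intro a _; simp
  | cons e t ih =>
    intro a ha
    simp only [List.foldl_cons, List.map_cons]
    by_cases hc : c e
    · simp only [if_pos hc]
      exact ih _ (le_trans ha (le_max_left a (v e)))
    · simp only [if_neg hc]
      rw [max_eq_left ha]
      exact ih a ha
  
-- fold of maxes of mfolds is the mfold of the flattened list
lemma mfold_flat {β : Type} (F : β → List Int) (ks : List β) :
    ∀ a : Int, 0 ≤ a →
    ks.foldl (fun b k => max b (mfold (F k))) a = (ks.flatMap F).foldl max a := by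
  induction ks with
  | nil => intro a _; simp
  | cons e t ih =>
    intro a ha
    simp only [List.foldl_cons, List.flatMap_cons, List.foldl_append]
    rw [← foldl_max_split (F e) a ha]
    exact ih _ (le_trans ha (le_foldl_max _ (F e) a))

-- membership characterizations
lemma mp_mem_iff (h : List Int) : ∀ q : Int × Int,
    q ∈ mp h ↔ ∃ x : Nat, x < 2 ^ h.length ∧ q = pairOf x h := by
  induction h with
  | nil =>
    intro q
    simp only [mp, List.mem_singleton, List.length_nil, pow_zero]
    constructor
    · intro hq; exact ⟨0, by omega, by simp [hq, pairOf, splitAux, isum, iprod]⟩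
    · rintro ⟨x, hx, rfl⟩; simp [pairOf, splitAux, isum, iprod]
  | cons e t ih =>
    intro q
    have hpair : ∀ x : Nat, pairOf x (e :: t) =
        if x % 2 = 0 then pairOf (x / 2) t
        else ((pairOf (x / 2) t).1 + e, (pairOf (x / 2) t).2 * e) := by
      intro x
      simp only [pairOf, splitAux]
      by_cases hp : x % 2 = 0
      · simp [hp]
      · simp [hp, isum_cons, iprod_cons]
        constructor
        · ring
        · ring
    simp only [mp, List.mem_append, List.mem_map]
    constructor
    · rintro (hq | ⟨q', hq', rfl⟩)
      · rcases (ih q).mp hq with ⟨y, hy, rfl⟩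
        refine ⟨2 * y, ?_, ?_⟩
        · simp only [List.length_cons, pow_succ]; omega
        · rw [hpair (2 * y)]
          have h1 : (2 * y) % 2 = 0 := by omega
          have h2 : (2 * y) / 2 = y := by omega
          simp [h2]
      · rcases (ih q').mp hq' with ⟨y, hy, rfl⟩
        refine ⟨2 * y + 1, ?_, ?_⟩
        · simp only [List.length_cons, pow_succ]; omega
        · rw [hpair (2 * y + 1)]
          have h2 : (2 * y + 1) / 2 = y := by omega
          simp [h2]
    · rintro ⟨x, hx, rfl⟩
      have hy : x / 2 < 2 ^ t.length := by
        simp only [List.length_cons, pow_succ] at hx; omega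
      rw [hpair x]
      by_cases hp : x % 2 = 0
      · left
        rw [if_pos hp]
        exact (ih _).mpr ⟨x / 2, hy, rfl⟩
      · right
        rw [if_neg hp]
        exact ⟨pairOf (x / 2) t, (ih _).mpr ⟨x / 2, hy, rfl⟩, rfl⟩

lemma mp_append_mem (l1 l2 : List Int) : ∀ q : Int × Int,
    q ∈ mp (l1 ++ l2) ↔ ∃ q1 ∈ mp l1, ∃ q2 ∈ mp l2, q = (q1.1 + q2.1, q1.2 * q2.2) := by
  induction l1 with
  | nil =>
    intro q
    simp only [List.nil_append, mp, List.mem_singleton]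
    constructor
    · intro hq; exact ⟨(0, 1), rfl, q, hq, by simp⟩
    · rintro ⟨q1, hq1, q2, hq2, rfl⟩
      subst hq1; simpa using hq2
  | cons e t ih =>
    intro q
    simp only [List.cons_append, mp, List.mem_append, List.mem_map]
    constructor
    · rintro (hq | ⟨q', hq', rfl⟩)
      · rcases (ih q).mp hq with ⟨q1, hq1, q2, hq2, rfl⟩
        exact ⟨q1, Or.inl hq1, q2, hq2, rfl⟩
      · rcases (ih q').mp hq' with ⟨q1, hq1, q2, hq2, rfl⟩
        exact ⟨(q1.1 + e, q1.2 * e), Or.inr ⟨q1, hq1, rfl⟩, q2, hq2, by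
          simp only [Prod.mk.injEq]; constructor
          · ring
          · ring⟩
    · rintro ⟨q1, hq1, q2, hq2, rfl⟩
      rcases hq1 with hq1 | ⟨q1', hq1', rfl⟩
      · exact Or.inl ((ih _).mpr ⟨q1, hq1, q2, hq2, rfl⟩)
      · refine Or.inr ⟨(q1'.1 + q2.1, q1'.2 * q2.2), (ih _).mpr ⟨q1', hq1', q2, hq2, rfl⟩, ?_⟩
        simp only [Prod.mk.injEq]; constructor
        · ring
        · ring

lemma mp_replicate_mem (p : Int) : ∀ (m : Nat) (q : Int × Int),
    q ∈ mp (List.replicate m p) ↔ ∃ k : Nat, k ≤ m ∧ q = ((k : Int) * p, p ^ k) := by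
  intro m
  induction m with
  | zero =>
    intro q
    simp only [List.replicate_zero, mp, List.mem_singleton]
    constructor
    · intro hq; exact ⟨0, le_refl 0, by simp [hq]⟩
    · rintro ⟨k, hk, rfl⟩
      have : k = 0 := Nat.le_zero.mp hk
      subst this; simp
  | succ m ih =>
    intro q
    rw [List.replicate_succ]
    simp only [mp, List.mem_append, List.mem_map]
    constructor
    · rintro (hq | ⟨q', hq', rfl⟩)
      · rcases (ih q).mp hq with ⟨k, hk, rfl⟩
        exact ⟨k, Nat.le_succ_of_le hk, rfl⟩
      · rcases (ih q').mp hq' with ⟨k, hk, rfl⟩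
        refine ⟨k + 1, by omega, ?_⟩
        simp only [Prod.mk.injEq]
        constructor
        · push_cast; ring
        · rw [pow_succ]
    · rintro ⟨k, hk, rfl⟩
      by_cases hkm : k ≤ m
      · exact Or.inl ((ih _).mpr ⟨k, hkm, rfl⟩)
      · have hk1 : k = m + 1 := by omega
        subst hk1
        refine Or.inr ⟨((m : Int) * p, p ^ m), (ih _).mpr ⟨m, le_refl m, rfl⟩, ?_⟩
        simp only [Prod.mk.injEq]
        constructor
        · push_cast; ring
        · rw [pow_succ]

-- hand = concatenation of the per-entry blocks
lemma handOf_eq (cards : List (Int × Int)) : handOf cards = cards.flatMap blk := by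
  suffices h : ∀ (cs : List (Int × Int)) (h0 : List Int),
      cs.foldl (fun h q => h ++ List.replicate q.2.toNat q.1) h0 = h0 ++ cs.flatMap blk by
    rw [show handOf cards = cards.foldl (fun h q => h ++ List.replicate q.2.toNat q.1) []
      from rfl, h cards [], List.nil_append]
  intro cs
  induction cs with
  | nil => intro h0; simp
  | cons e t ih => intro h0; simp [List.foldl_cons, ih, blk]

lemma totalOf_eq (cards : List (Int × Int)) : totalOf cards = isum (handOf cards) := by
  rw [handOf_eq]
  suffices h : ∀ (cs : List (Int × Int)) (a : Int),
      cs.foldl (fun t q => if q.2 > 0 then t + q.1 * q.2 else t) a = a + isum (cs.flatMap blk) by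
    simpa [totalOf] using h cards 0
  intro cs
  induction cs with
  | nil => intro a; simp [isum]
  | cons e t ih =>
    intro a
    simp only [List.foldl_cons, List.flatMap_cons, isum_append]
    rw [ih]
    rcases e with ⟨p, n⟩
    by_cases hn : n > 0
    · have : isum (blk (p, n)) = p * n := by
        rw [blk, isum_replicate]
        rw [Int.toNat_of_nonneg (by omega)]
        ring
      simp only [if_pos hn, this]; ring
    · have hz : n.toNat = 0 := by omega
      have : isum (blk (p, n)) = 0 := by simp [blk, hz, isum]
      simp only [if_neg hn, this]; ring

lemma foldl_max_fun_congr {β : Type} (f g : β → Int) (l : List β)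
    (h : ∀ k, max 0 (f k) = max 0 (g k)) :
    ∀ a : Int, 0 ≤ a →
      l.foldl (fun b k => max b (f k)) a = l.foldl (fun b k => max b (g k)) a := by
  induction l with
  | nil => intro a _; simp
  | cons e t ih =>
    intro a ha
    simp only [List.foldl_cons]
    have hmax : max a (f e) = max a (g e) := by
      calc max a (f e) = max (max a 0) (f e) := by rw [max_eq_left ha]
        _ = max a (max 0 (f e)) := max_assoc a 0 (f e)
        _ = max a (max 0 (g e)) := by rw [h e]
        _ = max (max a 0) (g e) := (max_assoc a 0 (g e)).symm
        _ = max a (g e) := by rw [max_eq_left ha]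
    rw [hmax]
    exact ih _ (le_trans ha (le_max_left a (g e)))

-- B's recursion computes the clamped max of leaves over mp of the remaining hand
lemma goB_eq (T : Int) : ∀ (cs : List (Int × Int)) (s pr : Int),
    max 0 (goB T cs s pr) =
      mfold ((mp (cs.flatMap blk)).map (fun q => leaf T (s + q.1, pr * q.2))) := by
  intro cs
  induction cs with
  | nil =>
    intro s pr
    simp only [List.flatMap_nil, mp, List.map_cons, List.map_nil, mfold, List.foldl_cons,
      List.foldl_nil, goB, leaf]
    simp
  | cons e t ih =>
    rcases e with ⟨p, n⟩
    intro s pr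
    have hnn : 0 ≤ goB T ((p, n) :: t) s pr := by
      simp only [goB]
      exact le_foldl_max _ _ 0
    rw [max_eq_right hnn]
    simp only [goB]
    have hstep : (List.range (n.toNat + 1)).foldl
        (fun b (k : Nat) => max b (goB T t (s + (k : Int) * p) (pr * p ^ k))) 0 =
        (List.range (n.toNat + 1)).foldl
        (fun b (k : Nat) => max b (mfold ((mp (t.flatMap blk)).map
          (fun q => leaf T (s + (k : Int) * p + q.1, pr * p ^ k * q.2))))) 0 := by
      apply foldl_max_fun_congr _ _ _ ?_ 0 (le_refl 0)
      intro k
      rw [ih]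
      exact (max_eq_right (le_mfold_init _ 0)).symm
    rw [hstep, mfold_flat (fun k : Nat => (mp (t.flatMap blk)).map
      (fun q => leaf T (s + (k : Int) * p + q.1, pr * p ^ k * q.2))) _ 0 (le_refl 0)]
    show mfold _ = _
    apply mfold_mem_congr
    intro v
    simp only [List.mem_flatMap, List.mem_map, List.mem_range, List.flatMap_cons]
    constructor
    · rintro ⟨k, hk, q, hq, rfl⟩
      refine ⟨(((k : Int) * p + q.1), (p ^ k * q.2)), ?_, ?_⟩
      · rw [mp_append_mem]
        exact ⟨((k : Int) * p, p ^ k), (mp_replicate_mem p n.toNat _).mpr ⟨k, by omega, rfl⟩,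
          q, hq, rfl⟩
      · simp only [leaf]; ring_nf
    · rintro ⟨q', hq', rfl⟩
      rw [mp_append_mem] at hq'
      rcases hq' with ⟨q1, hq1, q2, hq2, rfl⟩
      rcases (mp_replicate_mem p n.toNat q1).mp hq1 with ⟨k, hk, rfl⟩
      refine ⟨k, by omega, q2, hq2, ?_⟩
      simp only [leaf]; ring_nf

-- A as a max-fold of leaves over the range pairs
lemma solve_eq (cards : List (Int × Int)) :
    solve cards = mfold ((List.range (2 ^ (handOf cards).length)).map
      (fun x => leaf (isum (handOf cards)) (pairOf x (handOf cards)))) := by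
  set h := handOf cards with hh
  set T := isum h with hT
  have hinner : ∀ x : Nat,
      (fun maxScore x =>
        let st := splitFold x 0 h ([], [])
        if st.1.foldl (· + ·) 0 = st.2.foldl (· * ·) 1 then
          max maxScore (st.1.foldl (· + ·) 0)
        else maxScore) = (fun maxScore x =>
        if T - (pairOf x h).1 = (pairOf x h).2 then max maxScore (T - (pairOf x h).1)
        else maxScore) := by
    intro x
    funext acc y
    have hsf : splitFold y 0 h ([], []) = splitAux y h := by
      rw [splitFold_eq h y 0 [] []]
      simp
    have hs1 : (splitAux y h).1.foldl (· + ·) 0 = T - (pairOf y h).1 := by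
      have := splitAux_sum y h
      simp only [pairOf, isum] at *
      omega
    rw [hsf]
    simp only [hs1]
    rfl
  simp only [solve]
  rw [← hh, hinner 0]
  rw [foldl_step_eq (fun x : Nat => T - (pairOf x h).1 = (pairOf x h).2)
    (fun x : Nat => T - (pairOf x h).1) (List.range (2 ^ h.length)) 0 (le_refl 0)]
  rfl

lemma solve_alt_eq (cards : List (Int × Int)) :
    solve_alt cards = mfold ((mp (handOf cards)).map (leaf (isum (handOf cards)))) := by
  have hnn : 0 ≤ solve_alt cards := by
    rcases cards with _ | ⟨⟨p, n⟩, t⟩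
    · simp [solve_alt, goB, totalOf]
    · simp only [solve_alt, goB]
      exact le_foldl_max _ _ 0
  have hg : 0 ≤ goB (totalOf cards) cards 0 1 := hnn
  have : solve_alt cards = max 0 (goB (totalOf cards) cards 0 1) := by
    rw [max_eq_right hg]; rfl
  rw [this, goB_eq, totalOf_eq, handOf_eq]
  congr 1
  apply List.map_congr_left
  intro q _
  simp

-- ===== VERDICT (by name: the statement is the Claim_ definition above) =====
theorem solve_spec : Claim_equal_solve := by
  intro cards _
  unfold Spec_solve
  rw [solve_eq, solve_alt_eq]
  apply mfold_mem_congr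
  intro v
  simp only [List.mem_map, List.mem_range]
  constructor
  · rintro ⟨x, hx, rfl⟩
    exact ⟨pairOf x (handOf cards), (mp_mem_iff _ _).mpr ⟨x, hx, rfl⟩, rfl⟩
  · rintro ⟨q, hq, rfl⟩
    rcases (mp_mem_iff _ q).mp hq with ⟨x, hx, rfl⟩
    exact ⟨x, hx, rfl⟩
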